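-- pv_equiv track=rewrite | github.com/Darkhunter9/python | Hypercube.py | hypercube
-- ===== SOURCE A (Python) =====
-- def hypercube(grid):
--     word = ['h', 'y', 'p', 'e', 'r', 'c', 'u', 'b', 'e']
--     start = []
--     for i in range(len(grid)):
--         for j in range(len(grid[0])):
--             grid[i][j] = grid[i][j].lower()
--             if grid[i][j] == 'h':
--                 start.append((i,j))
--
--
--     def find(i, j, rank, route):
--         for (di,dj) in [(-1,0),(1,0),(0,-1),(0,1)]:
--             if i+di >= 0 and i+di < len(grid) and j+dj >= 0 and j+dj < len(grid[0]):
--                 if (i+di,j+dj) not in route and grid[i+di][j+dj] == word[rank+1]: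
--                     if rank+2 == len(word):
--                         return True
--                     else:
--                         if find(i+di,j+dj,rank+1,route+[((i+di,j+dj))]):
--                             return True
--         return
--
--     for (i,j) in start:
--         if find(i, j, 0, [(i,j)]):
--             return True
--
--     return False
-- ===== SOURCE B (Python) =====
-- def hypercube(grid):
--     # Layered frontier expansion ("BFS over partial paths") instead of recursive backtracking.
--     # Performs the same in-place lowercasing of grid as the original.
--     word = ['h', 'y', 'p', 'e', 'r', 'c', 'u', 'b', 'e']
--     rows = len(grid)
--     cols = len(grid[0]) if grid else 0
--     for i in range(rows):
--         for j in range(cols):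
--             grid[i][j] = grid[i][j].lower()
--     frontier = [((i, j), [(i, j)])
--                 for i in range(rows) for j in range(cols)
--                 if grid[i][j] == 'h']
--     for k in range(1, len(word)):
--         nxt = []
--         for ((i, j), route) in frontier:
--             for (di, dj) in ((-1, 0), (1, 0), (0, -1), (0, 1)):
--                 ni, nj = i + di, j + dj
--                 if 0 <= ni < rows and 0 <= nj < cols:
--                     if (ni, nj) not in route and grid[ni][nj] == word[k]:
--                         nxt.append(((ni, nj), route + [(ni, nj)]))
--         frontier = nxt
--     return bool(frontier)
-- ===== Notes on version B (the rewrite author's own statement) =====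
-- stated objective: alternative
-- what changed: Replaces the recursive backtracking search (closure `find` with early return) by a layered frontier expansion: a list of partial paths is extended one word-letter per round for 8 rounds, and the answer is whether the final frontier is nonempty.
import Mathlib
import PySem

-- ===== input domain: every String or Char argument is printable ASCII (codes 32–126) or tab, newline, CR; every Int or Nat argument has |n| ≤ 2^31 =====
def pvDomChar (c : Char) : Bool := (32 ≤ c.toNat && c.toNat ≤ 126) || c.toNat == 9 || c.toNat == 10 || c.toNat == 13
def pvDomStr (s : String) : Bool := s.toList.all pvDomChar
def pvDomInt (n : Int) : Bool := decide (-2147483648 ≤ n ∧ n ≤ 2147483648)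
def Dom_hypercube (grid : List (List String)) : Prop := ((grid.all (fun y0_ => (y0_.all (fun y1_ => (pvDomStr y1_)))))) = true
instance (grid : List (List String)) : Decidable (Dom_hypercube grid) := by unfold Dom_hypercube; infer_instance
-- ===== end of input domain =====

-- B replaces A's recursive backtracking `find` by a layered frontier expansion (one round
-- per remaining letter of "hypercube"); same return value, and Source B performs the same
-- in-place lowercasing of grid as A (the equivalence proved here is about the return value;
-- the mutation is identical in both Pythons).

-- ===== PORT A =====
-- shared data of both Pythons
def pvWord : List String := ["h", "y", "p", "e", "r", "c", "u", "b", "e"]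
def pvDirs : List (Int × Int) := [(-1, 0), (1, 0), (0, -1), (0, 1)]
-- Python mutates grid[i][j] = grid[i][j].lower() for j < cols; each cell is written once
-- (before any later read), so the loop is ported as a map producing the lowered grid (exact).
def pvLowerGrid (cols : Nat) (grid : List (List String)) : List (List String) :=
  grid.map (fun row => row.zipIdx.map (fun p => if p.2 < cols then PySem.Str.lower p.1 else p.1))
-- grid[i][j] for already-guarded nonnegative indices (none = row too short: Python raises, see Pre_)
def pvCell (G : List (List String)) (i j : Int) : Option String :=
  match PySem.List.pyGet? G i with
  | none => none
  | some row => PySem.List.pyGet? row j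
-- A's start list collected during the lowering loop (reads the already-lowered cells)
def pvStarts (cols : Nat) (G : List (List String)) : List (Int × Int) :=
  G.zipIdx.flatMap (fun ri =>
    ri.1.zipIdx.filterMap (fun sj =>
      if sj.2 < cols ∧ sj.1 = "h" then some ((ri.2 : Int), (sj.2 : Int)) else none))
-- A's recursive closure `find`; fuel = 8 - rank makes the recursion structural (never exhausted)
def pvFind (G : List (List String)) (cols : Nat) : Nat → Int → Int → Nat → List (Int × Int) → Bool
  | 0, _, _, _, _ => false
  | fuel + 1, i, j, rank, route =>
    pvDirs.any (fun d =>
      if 0 ≤ i + d.1 ∧ i + d.1 < (G.length : Int) ∧ 0 ≤ j + d.2 ∧ j + d.2 < (cols : Int) then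
        if (i + d.1, j + d.2) ∉ route ∧ pvCell G (i + d.1) (j + d.2) = some (pvWord.getD (rank + 1) "") then
          if rank + 2 = 9 then true
          else pvFind G cols fuel (i + d.1) (j + d.2) (rank + 1) (route ++ [(i + d.1, j + d.2)])
        else false
      else false)

def hypercube (grid : List (List String)) : Bool :=
  let cols := (grid.headD []).length
  let G := pvLowerGrid cols grid
  (pvStarts cols G).any (fun p => pvFind G cols 8 p.1 p.2 0 [p])

-- ===== PORT B =====
-- B's initial frontier: one frame ((i,j), [(i,j)]) per 'h' cell
def pvFrames (cols : Nat) (G : List (List String)) : List ((Int × Int) × List (Int × Int)) :=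
  G.zipIdx.flatMap (fun ri =>
    ri.1.zipIdx.filterMap (fun sj =>
      if sj.2 < cols ∧ sj.1 = "h" then
        some ((((ri.2 : Int), (sj.2 : Int)), [((ri.2 : Int), (sj.2 : Int))]))
      else none))
-- one round: extend every frame by every legal neighbour carrying word[k]
def pvExpand (G : List (List String)) (cols : Nat) (k : Nat)
    (frames : List ((Int × Int) × List (Int × Int))) : List ((Int × Int) × List (Int × Int)) :=
  frames.flatMap (fun fr =>
    pvDirs.filterMap (fun d =>
      if (0 ≤ fr.1.1 + d.1 ∧ fr.1.1 + d.1 < (G.length : Int) ∧ 0 ≤ fr.1.2 + d.2 ∧ fr.1.2 + d.2 < (cols : Int)) ∧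
         (fr.1.1 + d.1, fr.1.2 + d.2) ∉ fr.2 ∧
         pvCell G (fr.1.1 + d.1) (fr.1.2 + d.2) = some (pvWord.getD k "") then
        some ((fr.1.1 + d.1, fr.1.2 + d.2), fr.2 ++ [(fr.1.1 + d.1, fr.1.2 + d.2)])
      else none))

def hypercube_alt (grid : List (List String)) : Bool :=
  let cols := if grid.isEmpty then 0 else (grid.headD []).length
  let G := pvLowerGrid cols grid
  !((List.range' 1 8).foldl (fun fr k => pvExpand G cols k fr) (pvFrames cols G)).isEmpty

-- ===== PRECONDITION & SPEC =====
-- Pre_ excludes exactly the ragged grids on which Python A raises IndexError (a row shorter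
-- than the first row is indexed with j < len(grid[0]) during the lowercasing loop).
def Pre_hypercube (grid : List (List String)) : Prop :=
  ∀ row ∈ grid, (grid.headD []).length ≤ row.length
instance (grid : List (List String)) : Decidable (Pre_hypercube grid) := by
  unfold Pre_hypercube; infer_instance
def pvWitness_hypercube : List (List String) := [["h"]]

def Spec_hypercube (grid : List (List String)) (out : Bool) : Prop := out = hypercube_alt grid
instance (grid : List (List String)) (out : Bool) : Decidable (Spec_hypercube grid out) := by unfold Spec_hypercube; infer_instance

-- ===== CLAIM (what is proved, stated in full; the proofs are below) =====
def Claim_equal_hypercube : Prop := ∀ (grid : List (List String)), Dom_hypercube grid → Pre_hypercube grid → Spec_hypercube grid (hypercube grid)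

-- ===== LEMMAS AND PROOFS =====

theorem pvExpand_nil (G : List (List String)) (cols k : Nat) : pvExpand G cols k [] = [] := rfl

theorem pvExpand_append (G : List (List String)) (cols k : Nat)
    (xs ys : List ((Int × Int) × List (Int × Int))) :
    pvExpand G cols k (xs ++ ys) = pvExpand G cols k xs ++ pvExpand G cols k ys := by
  simp [pvExpand]

theorem fold_nil (G : List (List String)) (cols : Nat) (ks : List Nat) :
    ks.foldl (fun fr k => pvExpand G cols k fr) [] = [] := by
  induction ks with
  | nil => rfl
  | cons k ks ih => simpa [pvExpand_nil] using ih

theorem fold_append (G : List (List String)) (cols : Nat) (ks : List Nat) :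
    ∀ xs ys, ks.foldl (fun fr k => pvExpand G cols k fr) (xs ++ ys)
      = ks.foldl (fun fr k => pvExpand G cols k fr) xs
        ++ ks.foldl (fun fr k => pvExpand G cols k fr) ys := by
  induction ks with
  | nil => intro xs ys; rfl
  | cons k ks ih => intro xs ys; simp only [List.foldl_cons, pvExpand_append]; exact ih _ _

theorem isEmpty_append {α : Type} (xs ys : List α) :
    (xs ++ ys).isEmpty = (xs.isEmpty && ys.isEmpty) := by
  cases xs <;> simp

theorem nonempty_fold (G : List (List String)) (cols : Nat) (ks : List Nat) :
    ∀ frames : List ((Int × Int) × List (Int × Int)),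
      (!(ks.foldl (fun fr k => pvExpand G cols k fr) frames).isEmpty)
        = frames.any (fun fr => !(ks.foldl (fun f k => pvExpand G cols k f) [fr]).isEmpty) := by
  intro frames
  induction frames with
  | nil => simp [fold_nil]
  | cons fr rest ih =>
      have h : fr :: rest = [fr] ++ rest := rfl
      rw [h, fold_append, isEmpty_append]
      simp [Bool.not_and, ih]

theorem any_filterMap {α β : Type} (g : α → Option β) (p : β → Bool) :
    ∀ xs : List α, (xs.filterMap g).any p = xs.any (fun x => ((g x).map p).getD false) := by
  intro xs
  induction xs with
  | nil => rfl
  | cons x xs ih =>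
      cases h : g x <;> simp [h, ih]

theorem nonempty_true {α : Type} (xs : List α) : (!xs.isEmpty) = xs.any (fun _ => true) := by
  cases xs <;> simp

theorem expand_single (G : List (List String)) (cols k : Nat) (i j : Int)
    (route : List (Int × Int)) :
    pvExpand G cols k [((i, j), route)]
      = pvDirs.filterMap (fun d =>
          if (0 ≤ i + d.1 ∧ i + d.1 < (G.length : Int) ∧ 0 ≤ j + d.2 ∧ j + d.2 < (cols : Int)) ∧
             (i + d.1, j + d.2) ∉ route ∧
             pvCell G (i + d.1) (j + d.2) = some (pvWord.getD k "") then
            some ((i + d.1, j + d.2), route ++ [(i + d.1, j + d.2)])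
          else none) := by
  simp [pvExpand]

theorem nonempty_fold_expand_single (G : List (List String)) (cols : Nat) (ks : List Nat)
    (k : Nat) (i j : Int) (route : List (Int × Int)) :
    (!(ks.foldl (fun fr k => pvExpand G cols k fr) (pvExpand G cols k [((i, j), route)])).isEmpty)
      = pvDirs.any (fun d =>
          if (0 ≤ i + d.1 ∧ i + d.1 < (G.length : Int) ∧ 0 ≤ j + d.2 ∧ j + d.2 < (cols : Int)) ∧
             (i + d.1, j + d.2) ∉ route ∧
             pvCell G (i + d.1) (j + d.2) = some (pvWord.getD k "") then
            !(ks.foldl (fun fr k => pvExpand G cols k fr)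
                [((i + d.1, j + d.2), route ++ [(i + d.1, j + d.2)])]).isEmpty
          else false) := by
  rw [nonempty_fold, expand_single, any_filterMap]
  congr 1
  funext d
  split_ifs <;> rfl

-- main invariant: the recursive search from (i,j) at rank equals "the layered expansion of the
-- single frame ((i,j),route) through letters rank+1 .. 8 is nonempty"
theorem find_eq_fold (G : List (List String)) (cols : Nat) :
    ∀ fuel rank i j (route : List (Int × Int)), rank + fuel = 7 →
      pvFind G cols (fuel + 1) i j rank route
        = !((List.range' (rank + 1) (fuel + 1)).foldl (fun fr k => pvExpand G cols k fr)
              [((i, j), route)]).isEmpty := by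
  intro fuel
  induction fuel with
  | zero =>
      intro rank i j route h
      have hr : rank = 7 := by omega
      subst hr
      rw [List.range'_succ, List.foldl_cons, List.range'_zero, List.foldl_nil]
      show pvFind G cols (0 + 1) i j 7 route = _
      rw [pvFind, nonempty_true, expand_single, any_filterMap]
      congr 1
      funext d
      by_cases h1 : 0 ≤ i + d.1 ∧ i + d.1 < (G.length : Int) ∧ 0 ≤ j + d.2 ∧ j + d.2 < (cols : Int)
      · by_cases h2 : (i + d.1, j + d.2) ∉ route ∧
            pvCell G (i + d.1) (j + d.2) = some (pvWord.getD (7 + 1) "")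
        · simp [h1, h2]
        · rw [if_pos h1, if_neg h2, if_neg (fun hc => h2 hc.2)]
          rfl
      · rw [if_neg h1, if_neg (fun hc => h1 hc.1)]
        rfl
  | succ f ih =>
      intro rank i j route h
      rw [List.range'_succ, List.foldl_cons, nonempty_fold_expand_single]
      show pvFind G cols (f + 1 + 1) i j rank route = _
      rw [pvFind]
      congr 1
      funext d
      by_cases h1 : 0 ≤ i + d.1 ∧ i + d.1 < (G.length : Int) ∧ 0 ≤ j + d.2 ∧ j + d.2 < (cols : Int)
      · by_cases h2 : (i + d.1, j + d.2) ∉ route ∧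
            pvCell G (i + d.1) (j + d.2) = some (pvWord.getD (rank + 1) "")
        · rw [if_pos h1, if_pos h2, if_neg (show ¬(rank + 2 = 9) by omega), if_pos ⟨h1, h2⟩]
          exact ih (rank + 1) (i + d.1) (j + d.2) (route ++ [(i + d.1, j + d.2)]) (by omega)
        · rw [if_pos h1, if_neg h2, if_neg (fun hc => h2 hc.2)]
      · rw [if_neg h1, if_neg (fun hc => h1 hc.1)]

theorem frames_eq_map (cols : Nat) (G : List (List String)) :
    pvFrames cols G = (pvStarts cols G).map (fun p => (p, [p])) := by
  simp only [pvFrames, pvStarts, List.map_flatMap, List.map_filterMap]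
  congr 1
  funext ri
  congr 1
  funext sj
  split_ifs <;> rfl

theorem find_eq_fold8 (G : List (List String)) (cols : Nat) (p : Int × Int) :
    pvFind G cols 8 p.1 p.2 0 [p]
      = !((List.range' 1 8).foldl (fun fr k => pvExpand G cols k fr) [(p, [p])]).isEmpty := by
  have h := find_eq_fold G cols 7 0 p.1 p.2 [p] rfl
  simpa using h

theorem starts_any (G : List (List String)) (cols : Nat) :
    ∀ starts : List (Int × Int),
      (!((List.range' 1 8).foldl (fun fr k => pvExpand G cols k fr)
            (starts.map (fun p => (p, [p])))).isEmpty)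
        = starts.any (fun p => pvFind G cols 8 p.1 p.2 0 [p]) := by
  intro starts
  induction starts with
  | nil => simp [fold_nil]
  | cons p rest ih =>
      rw [List.map_cons,
        show ((p, [p]) :: rest.map (fun p => (p, [p]))) = [(p, [p])] ++ rest.map (fun p => (p, [p]))
          from rfl,
        fold_append, isEmpty_append]
      simp only [Bool.not_and, List.any_cons]
      rw [ih, ← find_eq_fold8]

-- ===== VERDICT (by name: the statement is the Claim_ definition above) =====
theorem hypercube_spec : Claim_equal_hypercube := by
  intro grid _ _
  show hypercube grid = hypercube_alt grid
  simp only [hypercube, hypercube_alt]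
  have hcols : (if grid.isEmpty then 0 else (grid.headD []).length) = (grid.headD []).length := by
    cases grid <;> simp
  rw [hcols, frames_eq_map]
  exact (starts_any _ _ _).symm
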